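-- pv_equiv track=rewrite | github.com/Din0zaBr/DSTU | TheoryOfInformation/sem6/fourth_lab/ai.py | matrix_encode
-- ===== SOURCE A (Python) =====
-- def matrix_encode(data, G):
--     k = len(G)
--     n = len(G[0])
--     blocks = [data[i:i + k] for i in range(0, len(data), k)]
--     encoded_blocks = []
--
--     for block in blocks:
--         block = block.zfill(k)
--         block_vector = [int(bit) for bit in block]
--         codeword = [0] * n
--         for i in range(n):
--             for j in range(k):
--                 codeword[i] += block_vector[j] * G[j][i]
--             codeword[i] %= 2
--         encoded_blocks.append(''.join(map(str, codeword)))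
--
--     return ''.join(encoded_blocks)
-- ===== SOURCE B (Python) =====
-- def matrix_encode(data, G):
--     # Bitmask encoder: each generator row is packed once into an integer bitmask
--     # (its entries reduced mod 2, MSB = column 0); a block's codeword is the XOR of
--     # the masks of the rows selected by odd message digits, read out bit by bit.
--     # Correct because codeword[i] = sum_j int(block[j])*G[j][i] mod 2, and a mod-2
--     # sum of products is the XOR over j with int(block[j]) odd of (G[j][i] mod 2).
--     k = len(G)
--     n = len(G[0])
--     masks = []
--     for row in G:
--         m = 0
--         for g in row[:n]:
--             m = 2 * m + g % 2
--         masks.append(m)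
--     pieces = []
--     for start in range(0, len(data), k):
--         block = data[start:start + k].zfill(k)
--         acc = 0
--         for j in range(k):
--             if int(block[j]) % 2 == 1:
--                 acc ^= masks[j]
--         pieces.append(''.join("1" if (acc >> (n - 1 - i)) % 2 == 1 else "0" for i in range(n)))
--     return ''.join(pieces)
-- ===== Notes on version B (the rewrite author's own statement) =====
-- stated objective: alternative
-- what changed: B precomputes each generator row once as an integer bitmask of its entries mod 2 and encodes every block as a single XOR of the masks selected by odd message digits, reading the codeword out of the accumulator's bits, instead of A's per-block integer dot product for every output column followed by a mod-2 reduction.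
import Mathlib
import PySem

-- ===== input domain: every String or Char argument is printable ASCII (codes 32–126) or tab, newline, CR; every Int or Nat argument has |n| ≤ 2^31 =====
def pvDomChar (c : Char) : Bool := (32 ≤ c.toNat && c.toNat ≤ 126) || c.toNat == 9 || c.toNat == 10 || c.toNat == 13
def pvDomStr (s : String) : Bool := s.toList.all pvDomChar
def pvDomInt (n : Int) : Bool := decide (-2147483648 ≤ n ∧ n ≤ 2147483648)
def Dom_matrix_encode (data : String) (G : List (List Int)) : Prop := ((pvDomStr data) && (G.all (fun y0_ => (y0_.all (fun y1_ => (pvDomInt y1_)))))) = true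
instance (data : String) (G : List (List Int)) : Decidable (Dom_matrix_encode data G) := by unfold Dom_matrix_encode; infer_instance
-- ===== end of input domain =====

-- B packs each generator row once into a mod-2 bitmask and encodes every block as one XOR of
-- the masks selected by odd message digits, reading the codeword off the accumulator's bits,
-- instead of A's per-column integer dot products; a different algorithm of similar cost.

-- ===== PORT A =====
-- int(bit) on a one-character string (shared helper of both ports; Pre_ restricts data to
-- ASCII digits, exactly where Python's int() returns a value).
def pyIntChar (c : Char) : Int := (PySem.Int.ofChars? [c]).getD 0

def matrix_encode (data : String) (G : List (List Int)) : String :=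
  let k := G.length
  let n := ((PySem.List.pyGet? G 0).getD []).length
  let dl := data.toList
  let blocks := (PySem.List.pyRange 0 (dl.length : Int) (k : Int)).map
      (fun i => PySem.List.slice dl (some i) (some (i + (k : Int))))
  let encoded := blocks.foldl (fun acc block =>
    let blockz := PySem.Chars.zfill block (k : Int)
    let v := blockz.map pyIntChar
    let codeword := (PySem.List.pyRange 0 (n : Int) 1).foldl (fun cw i =>
        let cw2 := (PySem.List.pyRange 0 (k : Int) 1).foldl (fun cw j =>
            PySem.List.pySetD cw i (PySem.List.pyGetD cw i 0 +
              PySem.List.pyGetD v j 0 * PySem.List.pyGetD (PySem.List.pyGetD G j []) i 0)) cw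
        PySem.List.pySetD cw2 i (PySem.Int.mod (PySem.List.pyGetD cw2 i 0) 2)) (List.replicate n (0 : Int))
    acc ++ [PySem.Str.join "" (codeword.map PySem.Int.toStr)]) []
  PySem.Str.join "" encoded

-- ===== PORT B =====
def matrix_encode_alt (data : String) (G : List (List Int)) : String :=
  let k := G.length
  let n := ((PySem.List.pyGet? G 0).getD []).length
  let dl := data.toList
  let masks := G.foldl (fun ms row =>
      ms ++ [(PySem.List.slice row none (some (n : Int))).foldl
        (fun m g => 2 * m + (PySem.Int.mod g 2).toNat) (0 : Nat)]) []
  let pieces := (PySem.List.pyRange 0 (dl.length : Int) (k : Int)).foldl (fun out start =>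
    let blockz := PySem.Chars.zfill (PySem.List.slice dl (some start) (some (start + (k : Int)))) (k : Int)
    let acc := (PySem.List.pyRange 0 (k : Int) 1).foldl (fun a j =>
        if PySem.Int.mod (pyIntChar (PySem.List.pyGetD blockz j ' ')) 2 == 1 then
          a ^^^ PySem.List.pyGetD masks j 0
        else a) (0 : Nat)
    out ++ [PySem.Str.join "" ((PySem.List.pyRange 0 (n : Int) 1).map (fun i =>
        if (acc >>> ((n : Int) - 1 - i).toNat) % 2 == 1 then "1" else "0"))]) []
  PySem.Str.join "" pieces

-- ===== PRECONDITION & SPEC =====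
-- Pre_ excludes exactly the inputs on which Python A raises: empty G (IndexError on G[0]),
-- and, when data is nonempty (so the block loop runs), a row shorter than the first row
-- (IndexError on G[j][i]) or a non-digit character in data (ValueError in int(bit)).
def Pre_matrix_encode (data : String) (G : List (List Int)) : Prop :=
  G ≠ [] ∧
  (data.toList = [] ∨
    ((G.all (fun row => (G.headD []).length ≤ row.length)) = true ∧
     (data.toList.all (fun c => '0' ≤ c && c ≤ '9')) = true))
instance (data : String) (G : List (List Int)) : Decidable (Pre_matrix_encode data G) := by
  unfold Pre_matrix_encode; infer_instance

def pvWitness_matrix_encode : String × List (List Int) := ("1011", [[1, 0, 1], [0, 1, 1]])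

def Spec_matrix_encode (data : String) (G : List (List Int)) (out : String) : Prop := out = matrix_encode_alt data G
instance (data : String) (G : List (List Int)) (out : String) : Decidable (Spec_matrix_encode data G out) := by unfold Spec_matrix_encode; infer_instance

-- ===== CLAIM (what is proved, stated in full; the proofs are below) =====
def Claim_equal_matrix_encode : Prop := ∀ (data : String) (G : List (List Int)), Dom_matrix_encode data G → Pre_matrix_encode data G → Spec_matrix_encode data G (matrix_encode data G)

-- ===== LEMMAS AND PROOFS =====


theorem foldl_set_same (i : Nat) (t : Nat → Int) :
    ∀ (l : List Nat) (cw : List Int), i < cw.length →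
      l.foldl (fun cw j => cw.set i (cw.getD i 0 + t j)) cw
        = cw.set i (cw.getD i 0 + (l.map t).sum) := by
  intro l
  induction l with
  | nil =>
    intro cw h
    simp only [List.foldl_nil, List.map_nil, List.sum_nil, add_zero]
    rw [List.getD_eq_getElem _ _ h, List.set_getElem_self h]
  | cons a l ih =>
    intro cw h
    simp only [List.foldl_cons, List.map_cons, List.sum_cons]
    rw [ih _ (by simpa using h), List.set_set]
    rw [List.getD_eq_getElem?_getD (l := cw.set i _), List.getElem?_set_self (by simpa using h)]
    congr 1
    simp [List.getD_eq_getElem?_getD]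
    ring

theorem A_loop (k : Nat) (term : Nat → Nat → Int) :
    ∀ (m : Nat) (init : List Int), m ≤ init.length →
      (List.range m).foldl (fun cw i =>
        ((List.range k).foldl (fun cw j => cw.set i (cw.getD i 0 + term j i)) cw).set i
          (PySem.Int.mod (((List.range k).foldl (fun cw j => cw.set i (cw.getD i 0 + term j i)) cw).getD i 0) 2)) init
      = (List.range m).map (fun i =>
          PySem.Int.mod (init.getD i 0 + ((List.range k).map (fun j => term j i)).sum) 2) ++ init.drop m := by
  intro m
  induction m with
  | zero => intro init h; simp
  | succ m ih =>
    intro init h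
    have hm : m < init.length := by omega
    rw [List.range_succ, List.foldl_append, List.foldl_cons, List.foldl_nil, ih init (by omega)]
    have hM : ((List.range m).map (fun i =>
        PySem.Int.mod (init.getD i 0 + ((List.range k).map (fun j => term j i)).sum) 2)).length = m := by simp
    have hlen : ((List.range m).map (fun i =>
        PySem.Int.mod (init.getD i 0 + ((List.range k).map (fun j => term j i)).sum) 2)
        ++ init.drop m).length = init.length := by simp; omega
    have hm' : m < ((List.range m).map (fun i =>
        PySem.Int.mod (init.getD i 0 + ((List.range k).map (fun j => term j i)).sum) 2)
        ++ init.drop m).length := by omega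
    rw [foldl_set_same m _ _ _ hm', List.set_set]
    rw [List.getD_eq_getElem?_getD (l := _ ++ _), List.getElem?_append_right (by omega), hM]
    rw [List.drop_eq_getElem_cons hm]
    simp only [Nat.sub_self, List.getElem?_cons_zero, Option.getD_some, List.set_append]
    rw [if_neg (by omega)]
    simp only [hM, Nat.sub_self, List.set_cons_zero]
    rw [if_neg (by omega), List.getD_eq_getElem?_getD, List.getElem?_append_right (by omega), hM,
        Nat.sub_self, List.getElem?_cons_zero, Option.getD_some, List.map_append]
    simp [List.getElem?_eq_getElem hm]

theorem testBit_maskOf :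
    ∀ (l : List Int) (i : Nat), i < l.length →
      Nat.testBit (l.foldl (fun m g => 2 * m + (PySem.Int.mod g 2).toNat) 0) (l.length - 1 - i)
        = decide (PySem.Int.mod (l.getD i 0) 2 = 1) := by
  have step : ∀ (l : List Int) (a : Nat) (g : Int),
      (l ++ [g]).foldl (fun m g => 2 * m + (PySem.Int.mod g 2).toNat) a
        = 2 * l.foldl (fun m g => 2 * m + (PySem.Int.mod g 2).toNat) a + (PySem.Int.mod g 2).toNat := by
    intro l a g; rw [List.foldl_append]; rfl
  have hb : ∀ g : Int, (PySem.Int.mod g 2).toNat < 2 := by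
    intro g
    have h1 := PySem.Int.mod_nonneg g (b := 2) (by norm_num)
    have h2 := PySem.Int.mod_lt g (b := 2) (by norm_num)
    omega
  intro l
  induction l using List.reverseRecOn with
  | nil => intro i h; simp at h
  | append_singleton l g ih =>
    intro i h
    rw [step]
    rcases Nat.lt_or_ge i l.length with hi | hi
    · have hpos : (l ++ [g]).length - 1 - i = (l.length - 1 - i) + 1 := by simp; omega
      rw [hpos, Nat.testBit_add_one]
      have hdiv : (2 * l.foldl (fun m g => 2 * m + (PySem.Int.mod g 2).toNat) 0 + (PySem.Int.mod g 2).toNat) / 2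
          = l.foldl (fun m g => 2 * m + (PySem.Int.mod g 2).toNat) 0 := by
        have := hb g; omega
      rw [hdiv, ih i hi]
      rw [List.getD_eq_getElem?_getD, List.getD_eq_getElem?_getD, List.getElem?_append_left hi]
    · have hiL : i = l.length := by simp at h; omega
      have hz : (l ++ [g]).length - 1 - i = 0 := by simp [hiL]
      rw [hz]
      have hlsb : Nat.testBit (2 * l.foldl (fun m g => 2 * m + (PySem.Int.mod g 2).toNat) 0 + (PySem.Int.mod g 2).toNat) 0
          = decide ((PySem.Int.mod g 2).toNat = 1) := by
        have := hb g
        simp [Nat.testBit_zero]; omega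
      rw [hlsb, hiL]
      have hg : (l ++ [g]).getD l.length 0 = g := by
        rw [List.getD_eq_getElem?_getD, List.getElem?_append_right (le_refl _)]; simp
      rw [hg]
      have h1 := PySem.Int.mod_nonneg g (b := 2) (by norm_num)
      have h2 := PySem.Int.mod_lt g (b := 2) (by norm_num)
      simp
      omega

theorem testBit_foldl_xor {α : Type} (t : Nat) (c : α → Bool) (f : α → Nat) :
    ∀ (l : List α) (a : Nat),
      Nat.testBit (l.foldl (fun a j => if c j then a ^^^ f j else a) a) t
        = l.foldl (fun p j => Bool.xor p (c j && Nat.testBit (f j) t)) (Nat.testBit a t) := by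
  intro l
  induction l with
  | nil => intro a; rfl
  | cons x l ih =>
    intro a
    simp only [List.foldl_cons]
    by_cases hx : c x
    · rw [if_pos hx, ih, Nat.testBit_xor]; simp [hx]
    · rw [if_neg hx, ih]; simp [hx]

theorem foldl_xor_parity {α : Type} (d : α → Bool) (s : α → Int) :
    ∀ (l : List α), (∀ j ∈ l, d j = decide (s j % 2 = 1)) → ∀ (S : Int),
      l.foldl (fun p j => Bool.xor p (d j)) (decide (S % 2 = 1))
        = decide ((S + (l.map s).sum) % 2 = 1) := by
  intro l
  induction l with
  | nil => intro _ S; simp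
  | cons x l ih =>
    intro hd S
    simp only [List.foldl_cons, List.map_cons, List.sum_cons]
    rw [hd x (by simp)]
    have hx : Bool.xor (decide (S % 2 = 1)) (decide (s x % 2 = 1)) = decide ((S + s x) % 2 = 1) := by
      have h1 := Int.emod_two_eq S
      have h2 := Int.emod_two_eq (s x)
      have h3 : (S + s x) % 2 = (S % 2 + s x % 2) % 2 := by omega
      rcases h1 with h1 | h1 <;> rcases h2 with h2 | h2 <;>
        simp [h1, h2, h3]
    rw [hx, ih (fun j hj => hd j (by simp [hj])) (S + s x)]
    ring_nf

theorem beq_one_int (x : Int) : (x == 1) = decide (x = 1) := by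
  by_cases h : x = 1 <;> simp [h]
theorem shift_mod (acc t : Nat) : ((acc >>> t) % 2 == 1) = Nat.testBit acc t := by
  rw [Nat.testBit, Nat.one_and_eq_mod_two]
  rcases Nat.mod_two_eq_zero_or_one (acc >>> t) with h | h <;> simp [h]
theorem toStr_case (S : Int) :
    PySem.Int.toStr (S % 2) = if decide (S % 2 = 1) then "1" else "0" := by
  rcases Int.emod_two_eq S with h | h <;> simp [h] <;> rfl
theorem parity_mul (a b : Int) :
    (decide (a % 2 = 1) && decide (b % 2 = 1)) = decide (a * b % 2 = 1) := by
  have hab : a * b % 2 = a % 2 * (b % 2) % 2 := by rw [Int.mul_emod]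
  rcases Int.emod_two_eq a with h1 | h1 <;> rcases Int.emod_two_eq b with h2 | h2 <;>
    simp [h1, h2, hab]

theorem block_eq (G : List (List Int)) (n : Nat) (bz : List Char)
    (hn : ∀ row ∈ G, n ≤ row.length) (hkb : G.length ≤ bz.length) :
    PySem.Str.join "" (List.map PySem.Int.toStr
      ((List.range n).foldl (fun cw i =>
        ((List.range G.length).foldl (fun cw j =>
            cw.set i (cw.getD i 0 + (bz.map pyIntChar).getD j 0 * (G.getD j []).getD i 0)) cw).set i
          (PySem.Int.mod (((List.range G.length).foldl (fun cw j =>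
            cw.set i (cw.getD i 0 + (bz.map pyIntChar).getD j 0 * (G.getD j []).getD i 0)) cw).getD i 0) 2))
        (List.replicate n 0)))
    = PySem.Str.join "" ((List.range n).map (fun i : Nat =>
        if ((List.range G.length).foldl (fun a j =>
              if (PySem.Int.mod (pyIntChar (bz.getD j ' ')) 2 == 1) = true then
                a ^^^ (G.map (fun row => (PySem.List.slice row none (some (n : Int))).foldl
                  (fun m g => 2 * m + (PySem.Int.mod g 2).toNat) 0)).getD j 0
              else a) 0 >>> ((n : Int) - 1 - (i : Int)).toNat) % 2 == 1 then "1" else "0")) := by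
  rw [A_loop G.length (fun j i => (bz.map pyIntChar).getD j 0 * (G.getD j []).getD i 0) n
      (List.replicate n 0) (by simp)]
  rw [List.drop_eq_nil_of_le (by simp), List.append_nil, List.map_map]
  refine congrArg _ (List.map_congr_left ?_)
  intro i hi
  have hi' : i < n := List.mem_range.mp hi
  have hmod : ∀ a : Int, PySem.Int.mod a 2 = a % 2 :=
    fun a => PySem.Int.mod_eq_emod_of_pos (by norm_num)
  -- the shift count
  have hsh : ((n : Int) - 1 - (i : Int)).toNat = n - 1 - i := by omega
  simp only [Function.comp_apply, hsh, shift_mod]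
  rw [testBit_foldl_xor (n - 1 - i)
      (fun j => (PySem.Int.mod (pyIntChar (bz.getD j ' ')) 2 == 1))
      (fun j => (G.map (fun row => (PySem.List.slice row none (some (n : Int))).foldl
        (fun m g => 2 * m + (PySem.Int.mod g 2).toNat) 0)).getD j 0)]
  have hinit : Nat.testBit 0 (n - 1 - i) = decide ((0 : Int) % 2 = 1) := by simp
  rw [hinit]
  rw [foldl_xor_parity _ (fun j => (bz.map pyIntChar).getD j 0 * (G.getD j []).getD i 0) _ ?_ 0]
  · -- final character comparison
    have : (List.replicate n (0:Int)).getD i 0 = 0 := by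
      rw [List.getD_eq_getElem?_getD]; simp [hi']
    rw [this, hmod, toStr_case]
  · -- pointwise parity identity
    intro j hj
    have hj' : j < G.length := List.mem_range.mp hj
    have hvj : (bz.map pyIntChar).getD j 0 = pyIntChar (bz.getD j ' ') := by
      rw [List.getD_eq_getElem _ _ (by simp; omega), List.getElem_map,
          List.getD_eq_getElem _ _ (by omega)]
    have hrow : n ≤ (G[j]'hj').length := hn _ (List.getElem_mem hj')
    have hmask : (G.map (fun row => (PySem.List.slice row none (some (n : Int))).foldl
          (fun m g => 2 * m + (PySem.Int.mod g 2).toNat) 0)).getD j 0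
        = ((G[j]'hj').take n).foldl (fun m g => 2 * m + (PySem.Int.mod g 2).toNat) 0 := by
      rw [List.getD_eq_getElem _ _ (by simp [hj']), List.getElem_map,
          PySem.List.slice_to_natCast]
    have htake : ((G[j]'hj').take n).length = n := by simp; omega
    have hbit : Nat.testBit (((G[j]'hj').take n).foldl
          (fun m g => 2 * m + (PySem.Int.mod g 2).toNat) 0) (n - 1 - i)
        = decide (PySem.Int.mod (((G[j]'hj').take n).getD i 0) 2 = 1) := by
      have := testBit_maskOf ((G[j]'hj').take n) i (by omega)
      rwa [htake] at this
    have hgetTake : ((G[j]'hj').take n).getD i 0 = (G.getD j []).getD i 0 := by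
      have h1 : i < (G[j]'hj').length := by omega
      have hGj : G.getD j [] = G[j]'hj' := List.getD_eq_getElem _ _ hj'
      rw [hGj, List.getD_eq_getElem _ _ (by rw [htake]; exact hi'), List.getElem_take,
          List.getD_eq_getElem _ _ h1]
    simp only [hvj, hmask, hbit, hgetTake]
    simp only [beq_one_int, hmod]
    exact parity_mul _ _

theorem ports_eq (data : String) (G : List (List Int)) (hpre : Pre_matrix_encode data G) :
    matrix_encode data G = matrix_encode_alt data G := by
  obtain ⟨hG, hrest⟩ := hpre
  rcases hrest with hdl | ⟨hrows, -⟩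
  · simp only [matrix_encode, matrix_encode_alt, hdl]
    simp [PySem.List.pyRange]
  · simp only [matrix_encode, matrix_encode_alt]
    rw [List.foldl_map, PySem.List.foldl_append_singleton_eq_map, PySem.List.foldl_append_singleton_eq_map,
        PySem.List.foldl_append_singleton_eq_map, List.nil_append, List.nil_append, List.nil_append]
    refine congrArg _ (List.map_congr_left ?_)
    intro st hst
    simp only [PySem.List.pyRange_zero_natCast, List.foldl_map, List.map_map,
        PySem.List.pySetD_natCast, PySem.List.pyGetD_natCast]
    have hn : ∀ row ∈ G, ((PySem.List.pyGet? G 0).getD []).length ≤ row.length := by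
      intro row hr
      have h0 : (PySem.List.pyGet? G 0).getD [] = G.headD [] := by
        cases G with
        | nil => simp at hG
        | cons h t => simp
      rw [h0]
      exact of_decide_eq_true (List.all_eq_true.mp hrows row hr)
    exact block_eq G ((PySem.List.pyGet? G 0).getD []).length
      (PySem.Chars.zfill (PySem.List.slice data.toList (some st) (some (st + (G.length : Int)))) (G.length : Int))
      hn (by rw [PySem.Chars.length_zfill]; simp)

-- ===== VERDICT (by name: the statement is the Claim_ definition above) =====
theorem matrix_encode_spec : Claim_equal_matrix_encode := by
  intro data G _ hpre
  unfold Spec_matrix_encode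
  exact ports_eq data G hpre
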